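-- pv_equiv track=rewrite | github.com/armorale/WeightZoneMatrix_bySvc | Excel_GridConversion_Rating_Working.py | createZoneHeader
-- ===== SOURCE A (Python) =====
-- def createZoneHeader(orderZones): #function to return a header of the unique zones in the data set
-- 	numericZones = []
-- 	numericZonesSorted = []
-- 	alphabeticZones = []
-- 	alphabeticZonesSorted =[]
-- 	for i in range(len(orderZones)):
-- 		try:
-- 			if int(orderZones[i])>1: #this eliminates zone 1 which is an offshore zone
-- 				numericZones.append(orderZones[i])
-- 		except ValueError:
-- 			alphabeticZones.append(orderZones[i])
-- 	numericZonesSorted = sorted(numericZones)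
-- 	alphabeticZonesSorted = sorted(alphabeticZones)
-- 	combinedHeader = []
-- 	combinedHeader = numericZonesSorted + alphabeticZonesSorted
-- 	return combinedHeader
-- ===== SOURCE B (Python) =====
-- def createZoneHeader(orderZones):
--     # group rank: 0 = numeric zone > 1 (kept), None = numeric zone <= 1 (dropped), 1 = alphabetic zone
--     def rank(zone):
--         try:
--             return 0 if int(zone) > 1 else None
--         except ValueError:
--             return 1
--     kept = [z for z in orderZones if rank(z) is not None]
--     # sort by zone name, then stable-sort by group rank: numerics first, alphabetics after
--     return sorted(sorted(kept), key=rank)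
-- ===== Notes on version B (the rewrite author's own statement) =====
-- stated objective: simpler
-- what changed: Replaces A's index loop with two accumulator lists and two separate sorts by a single filtered comprehension over a rank function followed by the sort-then-stable-sort-by-group-rank idiom (one expression).
import Mathlib
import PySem

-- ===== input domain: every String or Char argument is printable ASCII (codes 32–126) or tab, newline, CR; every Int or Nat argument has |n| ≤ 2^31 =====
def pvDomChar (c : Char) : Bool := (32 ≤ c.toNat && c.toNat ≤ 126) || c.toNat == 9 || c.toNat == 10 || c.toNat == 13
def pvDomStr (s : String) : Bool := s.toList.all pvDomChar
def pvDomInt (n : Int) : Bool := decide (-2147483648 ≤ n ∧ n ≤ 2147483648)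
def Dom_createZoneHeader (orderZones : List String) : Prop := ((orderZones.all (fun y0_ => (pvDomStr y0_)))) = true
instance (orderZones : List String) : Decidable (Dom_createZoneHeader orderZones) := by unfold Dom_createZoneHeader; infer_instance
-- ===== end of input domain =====

-- B replaces A's two accumulator lists + two sorts by one filtered pass and a sort-then-stable-sort by group rank (objective: simpler).


-- ===== PORT A =====
def createZoneHeader (orderZones : List String) : List String :=
  -- for i in range(len(orderZones)): try int(orderZones[i]) … append to one of the two lists
  let st := (PySem.List.pyRange 0 (PySem.List.len orderZones)).foldl
    (fun (acc : List String × List String) i =>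
      match PySem.Int.ofStr? (PySem.List.pyGetD orderZones i "") with
      | some n =>
          if n > 1 then (acc.1 ++ [PySem.List.pyGetD orderZones i ""], acc.2) else acc
      | none => (acc.1, acc.2 ++ [PySem.List.pyGetD orderZones i ""]))
    ([], [])
  let numericZonesSorted := PySem.List.sorted st.1 (fun z => z) false
  let alphabeticZonesSorted := PySem.List.sorted st.2 (fun z => z) false
  numericZonesSorted ++ alphabeticZonesSorted

-- ===== PORT B =====
-- rank(zone): 0 = numeric > 1 (kept), none = numeric <= 1 (dropped), 1 = alphabetic
def pvRank (zone : String) : Option Int :=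
  match PySem.Int.ofStr? zone with
  | some n => if n > 1 then some 0 else none
  | none => some 1

def createZoneHeader_alt (orderZones : List String) : List String :=
  let kept := orderZones.filter (fun z => (pvRank z).isSome)
  PySem.List.sorted (PySem.List.sorted kept (fun z => z) false)
    (fun z => (pvRank z).getD 0) false

-- ===== PRECONDITION & SPEC =====
def Spec_createZoneHeader (orderZones : List String) (out : List String) : Prop := out = createZoneHeader_alt orderZones
instance (orderZones : List String) (out : List String) : Decidable (Spec_createZoneHeader orderZones out) := by unfold Spec_createZoneHeader; infer_instance

-- ===== CLAIM (what is proved, stated in full; the proofs are below) =====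
def Claim_equal_createZoneHeader : Prop := ∀ (orderZones : List String), Dom_createZoneHeader orderZones → Spec_createZoneHeader orderZones (createZoneHeader orderZones)

-- ===== LEMMAS AND PROOFS =====

-- A's two predicates
def pvNum (z : String) : Bool :=
  match PySem.Int.ofStr? z with
  | some n => decide (1 < n)
  | none => false
def pvAlpha (z : String) : Bool := (PySem.Int.ofStr? z).isNone

-- A's loop computes the two filters
theorem createZoneHeader_eq (orderZones : List String) :
    createZoneHeader orderZones =
      PySem.List.sorted (orderZones.filter pvNum) (fun z => z) false ++
      PySem.List.sorted (orderZones.filter pvAlpha) (fun z => z) false := by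
  unfold createZoneHeader
  rw [PySem.List.foldl_pyRange_pyGetD orderZones ""
      (fun (acc : List String × List String) z =>
        match PySem.Int.ofStr? z with
        | some n => if n > 1 then (acc.1 ++ [z], acc.2) else acc
        | none => (acc.1, acc.2 ++ [z])) ([], []) (le_refl 0)]
  simp only [Int.toNat_zero, List.drop_zero]
  have hbody : (fun (acc : List String × List String) z =>
        match PySem.Int.ofStr? z with
        | some n => if n > 1 then (acc.1 ++ [z], acc.2) else acc
        | none => (acc.1, acc.2 ++ [z])) =
      (fun (s : List String × List String) e =>
        ((fun a (z : String) => if pvNum z then a ++ [z] else a) s.1 e,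
         (fun a (z : String) => if pvAlpha z then a ++ [z] else a) s.2 e)) := by
    funext acc z
    cases h : PySem.Int.ofStr? z with
    | none => simp [pvNum, pvAlpha, h]
    | some n =>
        by_cases hn : n > 1
        · simp [pvNum, pvAlpha, h, hn]
        · simp [pvNum, pvAlpha, h, hn]
  rw [hbody, PySem.List.foldl_prod_mk
      (f := fun a (z : String) => if pvNum z then a ++ [z] else a)
      (g := fun a (z : String) => if pvAlpha z then a ++ [z] else a)]
  rw [PySem.List.foldl_append_if_eq_filter, PySem.List.foldl_append_if_eq_filter]
  simp

-- insertion helpers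
theorem insertBy_all_false {α : Type} (before : α → α → Bool) (x : α) :
    ∀ l : List α, (∀ y ∈ l, before x y = false) →
      PySem.List.insertBy before x l = l ++ [x] := by
  intro l
  induction l with
  | nil => intro _; rfl
  | cons h t ih =>
      intro hall
      have hh := hall h (by simp)
      simp [PySem.List.insertBy, hh, ih (fun y hy => hall y (by simp [hy]))]

theorem insertBy_all_true {α : Type} (before : α → α → Bool) (x : α) (l : List α)
    (h : ∀ y ∈ l, before x y = true) :
    PySem.List.insertBy before x l = x :: l := by
  cases l with
  | nil => rfl
  | cons a t => simp [PySem.List.insertBy, h a (by simp)]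

theorem insertBy_append_front {α : Type} (before : α → α → Bool) (x : α) :
    ∀ (a0 a1 : List α), (∀ y ∈ a0, before x y = false) →
      PySem.List.insertBy before x (a0 ++ a1) = a0 ++ PySem.List.insertBy before x a1 := by
  intro a0
  induction a0 with
  | nil => intro a1 _; simp
  | cons h t ih =>
      intro a1 hall
      have hh := hall h (by simp)
      simp [PySem.List.insertBy, hh, ih a1 (fun y hy => hall y (by simp [hy]))]

-- stable sort by a 0/1-valued key is the stable partition
theorem sorted_binary_partition {α : Type} (r : α → Int) :
    ∀ (ys a0 a1 : List α), (∀ y ∈ ys, r y = 0 ∨ r y = 1) →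
      (∀ y ∈ a0, r y = 0) → (∀ y ∈ a1, r y = 1) →
      ys.foldl (fun acc x => PySem.List.insertBy (fun a b => decide (r a < r b)) x acc) (a0 ++ a1)
        = (a0 ++ ys.filter (fun y => r y == 0)) ++ (a1 ++ ys.filter (fun y => r y == 1)) := by
  intro ys
  induction ys with
  | nil => intro a0 a1 _ _ _; simp
  | cons x t ih =>
      intro a0 a1 hy h0 h1
      have hx := hy x (by simp)
      simp only [List.foldl_cons]
      rcases hx with hx0 | hx1
      · have hstep : PySem.List.insertBy (fun a b => decide (r a < r b)) x (a0 ++ a1)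
            = (a0 ++ [x]) ++ a1 := by
          rw [insertBy_append_front _ _ a0 a1
              (fun y hy0 => by simp [h0 y hy0, hx0])]
          rw [insertBy_all_true _ _ a1 (fun y hy1 => by simp [h1 y hy1, hx0])]
          simp
        rw [hstep, ih (a0 ++ [x]) a1 (fun y hyt => hy y (by simp [hyt]))
            (by intro y hy0; rcases List.mem_append.mp hy0 with h | h
                · exact h0 y h
                · simp at h; simpa [h] using hx0) h1]
        simp [hx0]
      · have hstep : PySem.List.insertBy (fun a b => decide (r a < r b)) x (a0 ++ a1)
            = (a0 ++ a1) ++ [x] := by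
          apply insertBy_all_false
          intro y hym
          rcases List.mem_append.mp hym with h | h
          · simp [h0 y h, hx1]
          · simp [h1 y h, hx1]
        rw [hstep, List.append_assoc a0 a1 [x],
            ih a0 (a1 ++ [x]) (fun y hyt => hy y (by simp [hyt])) h0
            (by intro y hy1; rcases List.mem_append.mp hy1 with h | h
                · exact h1 y h
                · simp at h; simpa [h] using hx1)]
        simp [hx1]

-- filtering a sorted-by-identity list is sorting the filtered list
theorem filter_sorted_id (p : String → Bool) (xs : List String) :
    (PySem.List.sorted xs (fun z => z) false).filter p
      = PySem.List.sorted (xs.filter p) (fun z => z) false := by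
  apply PySem.List.eq_of_perm_of_pairwise_le_of_injective (fun z => z)
      (fun a b h => h)
  · exact ((PySem.List.sorted_perm xs (fun z => z) false).filter p).trans
      (PySem.List.sorted_perm (xs.filter p) (fun z => z) false).symm
  · exact (PySem.List.sorted_pairwise xs (fun z => z)).filter p
  · exact PySem.List.sorted_pairwise (xs.filter p) (fun z => z)

-- pointwise facts tying pvRank to A's predicates
theorem kept_and_rank_zero (z : String) :
    ((pvRank z).isSome && ((pvRank z).getD 0 == 0)) = pvNum z := by
  simp only [pvRank, pvNum]
  cases h : PySem.Int.ofStr? z with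
  | none => simp
  | some n => by_cases hn : n > 1 <;> simp [hn]

theorem kept_and_rank_one (z : String) :
    ((pvRank z).isSome && ((pvRank z).getD 0 == 1)) = pvAlpha z := by
  simp only [pvRank, pvAlpha]
  cases h : PySem.Int.ofStr? z with
  | none => simp
  | some n => by_cases hn : n > 1 <;> simp [hn]

theorem rank_mem_binary (z : String) (h : (pvRank z).isSome = true) :
    (pvRank z).getD 0 = 0 ∨ (pvRank z).getD 0 = 1 := by
  simp only [pvRank] at *
  cases hz : PySem.Int.ofStr? z with
  | none => simp
  | some n =>
      by_cases hn : n > 1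
      · simp [hn]
      · simp [hz, hn] at h

-- ===== VERDICT (by name: the statement is the Claim_ definition above) =====
theorem createZoneHeader_spec : Claim_equal_createZoneHeader := by
  intro orderZones _
  unfold Spec_createZoneHeader
  rw [createZoneHeader_eq]
  simp only [createZoneHeader_alt]
  set r : String → Int := fun z => (pvRank z).getD 0 with hr
  set kept := orderZones.filter (fun z => (pvRank z).isSome) with hkept
  have hmem : ∀ y ∈ PySem.List.sorted kept (fun z => z) false, r y = 0 ∨ r y = 1 := by
    intro y hy
    have hk : y ∈ kept := (PySem.List.sorted_perm kept (fun z => z) false).mem_iff.mp hy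
    exact rank_mem_binary y (List.mem_filter.mp hk).2
  have hpart := sorted_binary_partition r (PySem.List.sorted kept (fun z => z) false) [] [] hmem
      (by intro y h; simp at h) (by intro y h; simp at h)
  simp only [List.nil_append, List.append_nil] at hpart
  rw [← PySem.List.sorted_eq_foldl_insertBy] at hpart
  rw [hpart, filter_sorted_id, filter_sorted_id]
  rw [hkept, List.filter_filter, List.filter_filter]
  have e0 : orderZones.filter (fun z => (r z == 0) && (pvRank z).isSome) = orderZones.filter pvNum :=
    List.filter_congr (fun z _ => by rw [Bool.and_comm]; exact kept_and_rank_zero z)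
  have e1 : orderZones.filter (fun z => (r z == 1) && (pvRank z).isSome) = orderZones.filter pvAlpha :=
    List.filter_congr (fun z _ => by rw [Bool.and_comm]; exact kept_and_rank_one z)
  rw [e0, e1]
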